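-- pv_equiv track=rewrite | github.com/Fearvi/DIAN | dian_nodos_v0.1_backup.py | _palabras_en_comun
-- ===== SOURCE A (Python) =====
-- def _palabras_en_comun(textos: list) -> set:
--     """Palabras significativas compartidas entre respuestas."""
--     stop_words = {'el', 'la', 'los', 'las', 'de', 'del', 'en', 'un', 'una',
--                   'y', 'o', 'a', 'es', 'se', 'que', 'por', 'con', 'para',
--                   'su', 'sus', 'al', 'lo', 'le', 'como', 'más', 'pero'}
--     if not textos:
--         return set()
--
--     sets = []
--     for texto in textos:
--         palabras = {
--             w.lower().strip('.,;:!?()') for w in texto.split()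
--             if len(w) > 4 and w.lower() not in stop_words
--         }
--         sets.append(palabras)
--
--     if len(sets) < 2:
--         return sets[0] if sets else set()
--
--     comunes = sets[0]
--     for s in sets[1:]:
--         comunes = comunes.intersection(s)
--     return comunes
-- ===== SOURCE B (Python) =====
-- def _palabras_en_comun(textos: list) -> set:
--     """Palabras significativas compartidas entre respuestas."""
--     stop_words = {'el', 'la', 'los', 'las', 'de', 'del', 'en', 'un', 'una',
--                   'y', 'o', 'a', 'es', 'se', 'que', 'por', 'con', 'para',
--                   'su', 'sus', 'al', 'lo', 'le', 'como', 'más', 'pero'}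
--     if not textos:
--         return set()
--
--     counts = {}
--     for texto in textos:
--         palabras = {
--             w.lower().strip('.,;:!?()') for w in texto.split()
--             if len(w) > 4 and w.lower() not in stop_words
--         }
--         for p in palabras:
--             counts[p] = counts.get(p, 0) + 1
--
--     n = len(textos)
--     return {p for p, c in counts.items() if c == n}
-- ===== Notes on version B (the rewrite author's own statement) =====
-- stated objective: alternative
-- what changed: Instead of materialising a list of per-text word sets and folding pairwise set intersections over it, B makes one pass keeping a single counter of how many texts' word-sets contain each word and returns the words whose count equals the number of texts.
import Mathlib
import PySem

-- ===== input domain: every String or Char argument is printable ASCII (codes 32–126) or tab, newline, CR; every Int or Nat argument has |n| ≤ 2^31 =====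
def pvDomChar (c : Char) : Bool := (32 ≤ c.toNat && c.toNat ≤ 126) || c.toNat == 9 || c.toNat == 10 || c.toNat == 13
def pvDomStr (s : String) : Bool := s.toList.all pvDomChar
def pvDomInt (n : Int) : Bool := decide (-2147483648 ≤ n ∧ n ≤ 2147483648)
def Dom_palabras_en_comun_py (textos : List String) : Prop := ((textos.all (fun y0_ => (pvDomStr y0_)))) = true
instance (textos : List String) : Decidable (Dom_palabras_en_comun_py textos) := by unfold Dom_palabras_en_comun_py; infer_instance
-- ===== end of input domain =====

-- B replaces A's list of per-text sets and pairwise-intersection fold by a single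
-- membership counter kept in one pass; alternative decomposition, same cost.


-- ===== PORT A =====
-- the stop_words constant, shared text of both Pythons
def pvStop : List String :=
  ["el", "la", "los", "las", "de", "del", "en", "un", "una",
   "y", "o", "a", "es", "se", "que", "por", "con", "para",
   "su", "sus", "al", "lo", "le", "como", "más", "pero"]

-- the set comprehension '{w.lower().strip('.,;:!?()') for w in texto.split() if len(w) > 4 and w.lower() not in stop_words}', identical in A and B
def pvProc (texto : String) : PySem.Set String :=
  PySem.Set.ofList
    (((PySem.Str.split₀ texto).filter
        (fun w => decide (4 < PySem.Str.len w) && !(pvStop.contains (PySem.Str.lower w)))).map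
      (fun w => PySem.Str.stripChars (PySem.Str.lower w) ".,;:!?()"))

def palabras_en_comun_py (textos : List String) : List String :=
  if textos = [] then []
  else
    -- sets = []; for texto in textos: sets.append(palabras)
    let sets : List (PySem.Set String) :=
      textos.foldl (fun acc texto => acc ++ [pvProc texto]) []
    if sets.length < 2 then (if sets = [] then [] else sets.headD [])  -- sets[0] if sets else set()
    else
      -- comunes = sets[0]; for s in sets[1:]: comunes = comunes.intersection(s)
      (sets.drop 1).foldl (fun comunes s => PySem.Set.inter comunes s) (sets.headD [])

-- ===== PORT B =====
def palabras_en_comun_py_alt (textos : List String) : List String :=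
  if textos = [] then []
  else
    -- counts = {}; for texto in textos: for p in palabras: counts[p] = counts.get(p, 0) + 1
    let counts : PySem.Dict String Int :=
      textos.foldl
        (fun d texto => (pvProc texto).foldl (fun d p => d.modify p 0 (· + 1)) d)
        PySem.Dict.empty
    -- {p for p, c in counts.items() if c == n}
    PySem.Set.ofList
      ((counts.items.filter (fun pc => pc.2 == (textos.length : Int))).map Prod.fst)

-- ===== PRECONDITION & SPEC =====
def Spec_palabras_en_comun_py (textos : List String) (out : List String) : Prop := out = palabras_en_comun_py_alt textos
instance (textos : List String) (out : List String) : Decidable (Spec_palabras_en_comun_py textos out) := by unfold Spec_palabras_en_comun_py; infer_instance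

-- ===== CLAIM (what is proved, stated in full; the proofs are below) =====
def Claim_equal_palabras_en_comun_py : Prop := ∀ (textos : List String), Dom_palabras_en_comun_py textos → Spec_palabras_en_comun_py textos (palabras_en_comun_py textos)

-- ===== LEMMAS AND PROOFS =====
theorem pvProc_nodup (t : String) : (pvProc t).Nodup := PySem.Set.nodup_ofList _

theorem pv_foldl_append {α β : Type} (f : α → β) (l : List α) (init : List β) :
    l.foldl (fun acc x => acc ++ [f x]) init = init ++ l.map f := by
  induction l generalizing init with
  | nil => simp
  | cons h t ih => simp [ih]

theorem pv_foldl_inter (ss : List (PySem.Set String)) (s0 : PySem.Set String) :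
    ss.foldl (fun c s => PySem.Set.inter c s) s0
      = s0.filter (fun w => ss.all (fun s => PySem.Set.contains s w)) := by
  induction ss generalizing s0 with
  | nil => simp
  | cons s rest ih =>
    rw [List.foldl_cons, ih]
    show (s0.filter _).filter _ = _
    rw [List.filter_filter]
    apply List.filter_congr
    intro w _
    simp [Bool.and_comm]

theorem pvA_char (t : String) (ts : List String) :
    palabras_en_comun_py (t :: ts)
      = (pvProc t).filter (fun w => (ts.map pvProc).all (fun s => PySem.Set.contains s w)) := by
  unfold palabras_en_comun_py
  rw [if_neg (by simp)]
  simp only [pv_foldl_append, List.nil_append, List.map_cons]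
  cases ts with
  | nil => simp
  | cons t2 ts' =>
    rw [if_neg (by simp)]
    have h := pv_foldl_inter (pvProc t2 :: List.map pvProc ts') (pvProc t)
    rw [List.foldl_cons] at h
    simpa using h

theorem pv_counts_eq (textos : List String) :
    textos.foldl
        (fun d texto => (pvProc texto).foldl (fun d p => d.modify p 0 (· + 1)) d)
        PySem.Dict.empty
      = PySem.Dict.counter ((textos.map pvProc).flatten) := by
  rw [PySem.Dict.counter_eq_foldl, List.foldl_flatten, List.foldl_map]

theorem pvB_char (t : String) (ts : List String) :
    palabras_en_comun_py_alt (t :: ts)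
      = (PySem.Set.ofList ((pvProc t ++ (ts.map pvProc).flatten))).filter
          (fun w => ((((pvProc t ++ (ts.map pvProc).flatten)).count w : Int) == ((t :: ts).length : Int))) := by
  unfold palabras_en_comun_py_alt
  rw [if_neg (by simp)]
  simp only [pv_counts_eq, List.map_cons, List.flatten_cons, PySem.Dict.items_counter]
  rw [List.filter_map, List.map_map]
  have h1 : (Prod.fst ∘ fun k => (k, (((pvProc t ++ (ts.map pvProc).flatten)).count k : Int))) = id := rfl
  rw [h1, List.map_id]
  exact PySem.Set.ofList_eq_self_of_nodup _ (List.Nodup.filter _ (PySem.Set.nodup_ofList _))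

theorem pv_countM_le (ts : List String) (w : String) :
    ((ts.map pvProc).flatten).count w ≤ ts.length := by
  induction ts with
  | nil => simp
  | cons a l ih =>
    simp only [List.map_cons, List.flatten_cons, List.count_append, List.length_cons]
    have h1 : (pvProc a).count w ≤ 1 := List.nodup_iff_count_le_one.mp (pvProc_nodup a) w
    omega

theorem pv_count_eq_iff (ts : List String) (w : String) :
    (((ts.map pvProc).flatten).count w = ts.length)
      ↔ (ts.map pvProc).all (fun s => PySem.Set.contains s w) = true := by
  induction ts with
  | nil => simp
  | cons a l ih =>
    simp only [List.map_cons, List.flatten_cons, List.count_append, List.all_cons,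
      Bool.and_eq_true, List.length_cons]
    have h1 : (pvProc a).count w ≤ 1 := List.nodup_iff_count_le_one.mp (pvProc_nodup a) w
    have h2 := pv_countM_le l w
    constructor
    · intro h
      have hc : (pvProc a).count w = 1 := by omega
      have hm : w ∈ pvProc a := List.count_pos_iff.mp (by omega)
      exact ⟨(PySem.Set.contains_iff _ _).mpr hm, ih.mp (by omega)⟩
    · rintro ⟨hc, hall⟩
      have hm : w ∈ pvProc a := (PySem.Set.contains_iff _ _).mp hc
      have : (pvProc a).count w = 1 := List.count_eq_one_of_mem (pvProc_nodup a) hm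
      rw [this, ih.mpr hall]
      omega

theorem pv_main (t : String) (ts : List String) :
    palabras_en_comun_py (t :: ts) = palabras_en_comun_py_alt (t :: ts) := by
  rw [pvA_char, pvB_char]
  have hofl : PySem.Set.ofList (pvProc t ++ (ts.map pvProc).flatten)
      = pvProc t ++ (PySem.Set.ofList ((ts.map pvProc).flatten)).filter
          (fun y => !(PySem.Set.contains (pvProc t) y)) := by
    rw [PySem.Set.ofList_append, PySem.Set.ofList_eq_self_of_nodup _ (pvProc_nodup t),
      PySem.Set.update_eq_append_filter]
  rw [hofl, List.filter_append]
  have hextra : ((PySem.Set.ofList ((ts.map pvProc).flatten)).filter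
        (fun y => !(PySem.Set.contains (pvProc t) y))).filter
        (fun w => ((((pvProc t ++ (ts.map pvProc).flatten)).count w : Int) == ((t :: ts).length : Int))) = [] := by
    rw [List.filter_eq_nil_iff]
    intro w hw
    have hnm : w ∉ pvProc t := by
      have := (List.mem_filter.mp hw).2
      simp at this
      exact this
    have h0 : (pvProc t).count w = 0 := List.count_eq_zero_of_not_mem hnm
    have h2 := pv_countM_le ts w
    simp only [List.count_append, h0, List.length_cons, beq_iff_eq]
    intro hcontra
    omega
  rw [hextra, List.append_nil]
  apply List.filter_congr
  intro w hw
  have hc1 : (pvProc t).count w = 1 := List.count_eq_one_of_mem (pvProc_nodup t) hw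
  have h2 := pv_countM_le ts w
  have hiff := pv_count_eq_iff ts w
  rw [Bool.eq_iff_iff]
  simp only [List.count_append, hc1, List.length_cons, beq_iff_eq, Nat.cast_add, Nat.cast_one]
  rw [← hiff]
  constructor
  · intro h; omega
  · intro h; omega

-- ===== VERDICT (by name: the statement is the Claim_ definition above) =====
theorem palabras_en_comun_py_spec : Claim_equal_palabras_en_comun_py := by
  intro textos _
  unfold Spec_palabras_en_comun_py
  cases textos with
  | nil => rfl
  | cons t ts => exact pv_main t ts
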